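-- pv_equiv track=rewrite | github.com/madhavsinghal88/stock-intelligence-dashboard | utils.py | get_country_from_symbol
-- ===== SOURCE A (Python) =====
-- def get_country_from_symbol(symbol: str) -> str:
--     """
--     Determine the country/market from a stock symbol suffix.
--
--     Args:
--         symbol: Stock symbol (e.g., RELIANCE.NS, BMW.DE)
--
--     Returns:
--         Country/Market name
--     """
--     suffix_map = {
--         ".NS": "India (NSE)",
--         ".BO": "India (BSE)",
--         ".DE": "Germany",
--         ".L": "UK",
--         ".PA": "France",
--         ".AS": "Netherlands",
--         ".MI": "Italy",
--         ".MC": "Spain",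
--         ".SW": "Switzerland",
--         ".ST": "Sweden",
--         ".CO": "Denmark",
--         ".OL": "Norway",
--         ".HE": "Finland",
--         ".VI": "Austria",
--         ".T": "Japan",
--         ".HK": "Hong Kong",
--         ".SS": "China (Shanghai)",
--         ".SZ": "China (Shenzhen)",
--         ".KS": "South Korea",
--         ".KQ": "South Korea (KOSDAQ)",
--         ".TW": "Taiwan",
--         ".TWO": "Taiwan (OTC)",
--         ".SI": "Singapore",
--         ".AX": "Australia",
--         ".NZ": "New Zealand",
--         ".JK": "Indonesia",
--         ".BK": "Thailand",
--         ".KL": "Malaysia",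
--         ".TO": "Canada (TSX)",
--         ".V": "Canada (Venture)",
--         ".SA": "Brazil",
--         ".MX": "Mexico",
--         ".SN": "Chile",
--         ".BA": "Argentina",
--         ".JO": "South Africa",
--         ".TA": "Israel",
--         ".IS": "Turkey",
--     }
--
--     symbol_upper = symbol.upper()
--     for suffix, country in suffix_map.items():
--         if symbol_upper.endswith(suffix.upper()):
--             return country
--
--     # No suffix usually means US
--     if "." not in symbol:
--         return "USA"
--
--     return "Unknown"
-- ===== SOURCE B (Python) =====
-- def _country_of(segment: str) -> str:
--     """Country for the (already uppercased) suffix segment after the last dot."""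
--     match segment:
--         case "NS": return "India (NSE)"
--         case "BO": return "India (BSE)"
--         case "DE": return "Germany"
--         case "L": return "UK"
--         case "PA": return "France"
--         case "AS": return "Netherlands"
--         case "MI": return "Italy"
--         case "MC": return "Spain"
--         case "SW": return "Switzerland"
--         case "ST": return "Sweden"
--         case "CO": return "Denmark"
--         case "OL": return "Norway"
--         case "HE": return "Finland"
--         case "VI": return "Austria"
--         case "T": return "Japan"
--         case "HK": return "Hong Kong"
--         case "SS": return "China (Shanghai)"
--         case "SZ": return "China (Shenzhen)"
--         case "KS": return "South Korea"
--         case "KQ": return "South Korea (KOSDAQ)"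
--         case "TW": return "Taiwan"
--         case "TWO": return "Taiwan (OTC)"
--         case "SI": return "Singapore"
--         case "AX": return "Australia"
--         case "NZ": return "New Zealand"
--         case "JK": return "Indonesia"
--         case "BK": return "Thailand"
--         case "KL": return "Malaysia"
--         case "TO": return "Canada (TSX)"
--         case "V": return "Canada (Venture)"
--         case "SA": return "Brazil"
--         case "MX": return "Mexico"
--         case "SN": return "Chile"
--         case "BA": return "Argentina"
--         case "JO": return "South Africa"
--         case "TA": return "Israel"
--         case "IS": return "Turkey"
--         case _: return "Unknown"
--
--
-- def get_country_from_symbol(symbol: str) -> str: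
--     """Determine the country/market from a stock symbol suffix (parse last segment, branch on it)."""
--     _head, sep, tail = symbol.upper().rpartition(".")
--     if not sep:
--         # No suffix usually means US
--         return "USA"
--     return _country_of(tail)
-- ===== Notes on version B (the rewrite author's own statement) =====
-- stated objective: alternative
-- what changed: Replaced the 37-iteration endswith scan over a dot-keyed dict by rpartition on the last dot plus a direct 38-way branch (match statement) on the suffix segment itself: no dot means USA, otherwise the segment selects the country, defaulting to Unknown.
import Mathlib
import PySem

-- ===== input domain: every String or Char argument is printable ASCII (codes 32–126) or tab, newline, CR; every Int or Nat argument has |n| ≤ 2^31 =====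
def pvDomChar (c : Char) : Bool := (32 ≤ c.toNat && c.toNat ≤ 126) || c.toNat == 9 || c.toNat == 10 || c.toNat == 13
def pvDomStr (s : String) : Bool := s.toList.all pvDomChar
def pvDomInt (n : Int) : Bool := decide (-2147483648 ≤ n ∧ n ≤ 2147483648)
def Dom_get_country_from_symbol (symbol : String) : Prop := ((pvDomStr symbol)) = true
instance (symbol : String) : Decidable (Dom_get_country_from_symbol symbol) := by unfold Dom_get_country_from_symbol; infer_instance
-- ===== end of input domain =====

-- B replaces A's 37-iteration endswith scan over a dot-keyed dict by rpartition on the last dot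
-- plus a direct branch on the suffix segment (alternative decomposition; no speed claim).

-- ===== PORT A =====
-- the suffix → country dict A carries as a literal
def pvSuffixMap : List (String × String) := [
  (".NS", "India (NSE)"), (".BO", "India (BSE)"), (".DE", "Germany"), (".L", "UK"),
  (".PA", "France"), (".AS", "Netherlands"), (".MI", "Italy"), (".MC", "Spain"),
  (".SW", "Switzerland"), (".ST", "Sweden"), (".CO", "Denmark"), (".OL", "Norway"),
  (".HE", "Finland"), (".VI", "Austria"), (".T", "Japan"), (".HK", "Hong Kong"),
  (".SS", "China (Shanghai)"), (".SZ", "China (Shenzhen)"), (".KS", "South Korea"),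
  (".KQ", "South Korea (KOSDAQ)"), (".TW", "Taiwan"), (".TWO", "Taiwan (OTC)"),
  (".SI", "Singapore"), (".AX", "Australia"), (".NZ", "New Zealand"), (".JK", "Indonesia"),
  (".BK", "Thailand"), (".KL", "Malaysia"), (".TO", "Canada (TSX)"), (".V", "Canada (Venture)"),
  (".SA", "Brazil"), (".MX", "Mexico"), (".SN", "Chile"), (".BA", "Argentina"),
  (".JO", "South Africa"), (".TA", "Israel"), (".IS", "Turkey")]

-- 'for suffix, country in suffix_map.items(): if symbol_upper.endswith(suffix.upper()): return country'
def pvLoopA (symbol_upper : String) : List (String × String) → Option String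
  | [] => none
  | (suffix, country) :: rest =>
      if PySem.Str.endswith symbol_upper (PySem.Str.upper suffix) then some country
      else pvLoopA symbol_upper rest

def get_country_from_symbol (symbol : String) : String :=
  let symbol_upper := PySem.Str.upper symbol
  match pvLoopA symbol_upper pvSuffixMap with
  | some country => country
  | none => if !(PySem.Str.isIn "." symbol) then "USA" else "Unknown"

-- ===== PORT B =====
-- Source B's _country_of: a match statement on the (uppercased) segment after the last dot,
-- ported as the corresponding pattern match on the segment string
def pvCountryOf : String → String
  | "NS" => "India (NSE)"
  | "BO" => "India (BSE)"
  | "DE" => "Germany"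
  | "L" => "UK"
  | "PA" => "France"
  | "AS" => "Netherlands"
  | "MI" => "Italy"
  | "MC" => "Spain"
  | "SW" => "Switzerland"
  | "ST" => "Sweden"
  | "CO" => "Denmark"
  | "OL" => "Norway"
  | "HE" => "Finland"
  | "VI" => "Austria"
  | "T" => "Japan"
  | "HK" => "Hong Kong"
  | "SS" => "China (Shanghai)"
  | "SZ" => "China (Shenzhen)"
  | "KS" => "South Korea"
  | "KQ" => "South Korea (KOSDAQ)"
  | "TW" => "Taiwan"
  | "TWO" => "Taiwan (OTC)"
  | "SI" => "Singapore"
  | "AX" => "Australia"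
  | "NZ" => "New Zealand"
  | "JK" => "Indonesia"
  | "BK" => "Thailand"
  | "KL" => "Malaysia"
  | "TO" => "Canada (TSX)"
  | "V" => "Canada (Venture)"
  | "SA" => "Brazil"
  | "MX" => "Mexico"
  | "SN" => "Chile"
  | "BA" => "Argentina"
  | "JO" => "South Africa"
  | "TA" => "Israel"
  | "IS" => "Turkey"
  | _ => "Unknown"

-- s.rpartition("."): 'some tail' = the characters after the LAST dot (sep found), 'none' = no dot.
-- Structural recursion: if the rest of the string still contains a dot the answer comes from there,
-- otherwise the current character is the last dot (if it is one). Exact for the tail/sep use below.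
def pvRPartTail : List Char → Option (List Char)
  | [] => none
  | c :: rest =>
      match pvRPartTail rest with
      | some seg => some seg
      | none => if c == '.' then some rest else none

def get_country_from_symbol_alt (symbol : String) : String :=
  match pvRPartTail (PySem.Str.upper symbol).toList with
  | none => "USA"
  | some tail => pvCountryOf (String.ofList tail)

-- ===== PRECONDITION & SPEC =====
def Spec_get_country_from_symbol (symbol : String) (out : String) : Prop := out = get_country_from_symbol_alt symbol
instance (symbol : String) (out : String) : Decidable (Spec_get_country_from_symbol symbol out) := by unfold Spec_get_country_from_symbol; infer_instance

-- ===== CLAIM (what is proved, stated in full; the proofs are below) =====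
def Claim_equal_get_country_from_symbol : Prop := ∀ (symbol : String), Dom_get_country_from_symbol symbol → Spec_get_country_from_symbol symbol (get_country_from_symbol symbol)

-- ===== LEMMAS AND PROOFS =====

-- the reversed segment after the last dot, as A's endswith scan sees it
def pvLastSeg (l : List Char) : List Char := (l.reverse.takeWhile (fun c => c != '.')).reverse

theorem char_le_toNat (a b : Char) : a ≤ b ↔ a.toNat ≤ b.toNat := Iff.rfl

theorem upperChar_ne_dot_of_islower (c : Char) (h : PySem.Chars.islower c = true) :
    PySem.Chars.upperChar c ≠ '.' := by
  simp only [PySem.Chars.islower, Bool.and_eq_true, decide_eq_true_eq, char_le_toNat] at h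
  intro hc
  have h2 : (Char.ofNat (c.toNat - 32)).toNat = '.'.toNat := by
    rw [← hc]
    congr 1
    simp only [PySem.Chars.upperChar, PySem.Chars.islower]
    rw [if_pos]
    simp only [Bool.and_eq_true, decide_eq_true_eq, char_le_toNat]
    exact h
  have hv : ('a'.toNat ≤ c.toNat ∧ c.toNat ≤ 'z'.toNat) := h
  have ha : 'a'.toNat = 97 := by decide
  have hz : 'z'.toNat = 122 := by decide
  rw [Char.toNat_ofNat, if_pos] at h2
  · have : '.'.toNat = 46 := by decide
    omega
  · simp [Nat.isValidChar]; omega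

theorem upperChar_eq_dot_iff (c : Char) : PySem.Chars.upperChar c = '.' ↔ c = '.' := by
  by_cases h : PySem.Chars.islower c = true
  · constructor
    · intro hc; exact absurd hc (upperChar_ne_dot_of_islower c h)
    · intro hc; rw [hc] at h; exact absurd h (by decide)
  · simp only [PySem.Chars.upperChar, h]
    simp

theorem isIn_dot_iff (s : String) : PySem.Str.isIn "." s = true ↔ '.' ∈ s.toList := by
  rw [show PySem.Str.isIn "." s = PySem.Chars.isIn ['.'] s.toList from rfl,
      PySem.Chars.isIn_iff_infix]
  exact List.singleton_infix_iff '.' s.toList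

theorem dot_mem_upper_iff (s : String) :
    '.' ∈ (PySem.Str.upper s).toList ↔ '.' ∈ s.toList := by
  rw [show (PySem.Str.upper s).toList = (s.toList).map PySem.Chars.upperChar from by
        simp [PySem.Str.upper, PySem.Chars.upper]]
  constructor
  · intro h
    obtain ⟨c, hc, he⟩ := List.mem_map.mp h
    exact (upperChar_eq_dot_iff c).mp he ▸ hc
  · intro h
    exact List.mem_map.mpr ⟨'.', h, (upperChar_eq_dot_iff '.').mpr rfl⟩

theorem takeWhile_dotfree_append (u r : List Char) (hu : '.' ∉ u) :
    (u ++ '.' :: r).takeWhile (fun c => c != '.') = u := by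
  induction u with
  | nil => simp
  | cons a us ih =>
      have ha : a ≠ '.' := fun h => hu (h ▸ List.mem_cons_self)
      have hus : '.' ∉ us := fun h => hu (List.mem_cons_of_mem a h)
      simp [ha, ih hus]

theorem prefix_dot_iff (u r : List Char) (hu : '.' ∉ u) :
    (u ++ ['.'] <+: r) ↔ ('.' ∈ r ∧ r.takeWhile (fun c => c != '.') = u) := by
  constructor
  · rintro ⟨rest, hr⟩
    subst hr
    refine ⟨by simp, ?_⟩
    rw [List.append_assoc]
    exact takeWhile_dotfree_append u rest hu
  · rintro ⟨hmem, htw⟩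
    have hsplit := (List.takeWhile_append_dropWhile (p := fun c => c != '.') (l := r)).symm
    have hne : r.dropWhile (fun c => c != '.') ≠ [] := by
      intro hnil
      have := List.dropWhile_eq_nil_iff.mp hnil (x := '.') hmem
      simp at this
    obtain ⟨hd, tl, hdt⟩ := List.exists_cons_of_ne_nil hne
    have hhd' : hd = '.' := by
      have := List.head_dropWhile_not (l := r) (p := fun c => c != '.') hne
      simp [hdt] at this
      exact this
    refine ⟨tl, ?_⟩
    rw [hsplit, htw, hdt, hhd']
    simp

theorem endswith_entry (L t : List Char) (ht : '.' ∉ t) (hL : '.' ∈ L) :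
    PySem.Chars.endswith L ('.' :: t) = true ↔
      L.reverse.takeWhile (fun c => c != '.') = t.reverse := by
  rw [PySem.Chars.endswith_iff]
  have h1 : ('.' :: t) <:+ L ↔ ('.' :: t).reverse <+: L.reverse := List.reverse_prefix.symm
  rw [h1, show ('.' :: t).reverse = t.reverse ++ ['.'] by simp,
      prefix_dot_iff t.reverse L.reverse (by simpa using ht)]
  simp [hL]

theorem endswith_entry_nodot (L t : List Char) (hL : '.' ∉ L) :
    PySem.Chars.endswith L ('.' :: t) = false := by
  by_contra h
  have h' : PySem.Chars.endswith L ('.' :: t) = true := by simpa using h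
  have hs : ('.' :: t) <:+ L := (PySem.Chars.endswith_iff L ('.' :: t)).mp h'
  exact hL (hs.subset List.mem_cons_self)

-- the key shape of every entry of A's table
def pvGoodEntry (p : String × String) : Prop :=
  ∃ t : List Char, p.1.toList = '.' :: t ∧ '.' ∉ t ∧ PySem.Str.upper p.1 = p.1

theorem pvSuffixMap_good : ∀ p ∈ pvSuffixMap, pvGoodEntry p := by
  intro p hp
  fin_cases hp <;> exact ⟨_, rfl, by decide, rfl⟩

theorem loop_eq_lookup (up : String) (h : '.' ∈ up.toList) (m : List (String × String))
    (hm : ∀ p ∈ m, pvGoodEntry p) :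
    pvLoopA up m =
      PySem.Dict.get? (PySem.Dict.mk m) (String.ofList ('.' :: pvLastSeg up.toList)) := by
  induction m with
  | nil => simp [pvLoopA, PySem.Dict.get?]
  | cons p rest ih =>
      obtain ⟨s, c⟩ := p
      obtain ⟨t, hts, htd, hup⟩ := hm (s, c) List.mem_cons_self
      have hrest : ∀ p ∈ rest, pvGoodEntry p := fun p hp => hm p (List.mem_cons_of_mem _ hp)
      have hcond : (PySem.Str.endswith up (PySem.Str.upper s) = true) ↔
          (s == String.ofList ('.' :: pvLastSeg up.toList)) = true := by
        rw [hup, show PySem.Str.endswith up s = PySem.Chars.endswith up.toList s.toList from rfl,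
            hts, endswith_entry up.toList t htd h, beq_iff_eq, String.ext_iff,
            String.toList_ofList, hts]
        constructor
        · intro hw
          simp only [List.cons.injEq, true_and]
          rw [pvLastSeg, hw]
          simp
        · intro hw
          have : t = pvLastSeg up.toList := by simpa using hw
          rw [this, pvLastSeg]
          simp
      rw [pvLoopA, PySem.Dict.get?_mk_cons]
      by_cases hc : PySem.Str.endswith up (PySem.Str.upper s) = true
      · rw [if_pos hc, if_pos (hcond.mp hc)]
      · rw [if_neg hc, if_neg (fun hb => hc (hcond.mpr hb)), ih hrest]

theorem loop_none (up : String) (h : '.' ∉ up.toList) (m : List (String × String))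
    (hm : ∀ p ∈ m, pvGoodEntry p) : pvLoopA up m = none := by
  induction m with
  | nil => rfl
  | cons p rest ih =>
      obtain ⟨s, c⟩ := p
      obtain ⟨t, hts, htd, hup⟩ := hm (s, c) List.mem_cons_self
      rw [pvLoopA, if_neg, ih (fun p hp => hm p (List.mem_cons_of_mem _ hp))]
      rw [hup, show PySem.Str.endswith up s = PySem.Chars.endswith up.toList s.toList from rfl,
          hts, endswith_entry_nodot up.toList t h]
      simp

-- B-side: pvRPartTail finds nothing exactly when there is no dot
theorem rpartTail_none_iff (l : List Char) : pvRPartTail l = none ↔ '.' ∉ l := by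
  induction l with
  | nil => simp [pvRPartTail]
  | cons c rest ih =>
      rw [pvRPartTail]
      cases h : pvRPartTail rest with
      | some seg =>
          simp only []
          constructor
          · intro hx; exact absurd hx (by simp)
          · intro hx
            exact absurd (ih.mpr (fun hm => hx (List.mem_cons_of_mem c hm))) (by simp [h])
      | none =>
          have hrest : '.' ∉ rest := ih.mp h
          by_cases hc : c = '.'
          · simp [hc]
          · simp [Ne.symm hc, hrest, (beq_iff_eq (a := c) (b := '.')).not.mpr hc]

theorem takeWhile_append_of_stop (p : Char → Bool) (u v : List Char)
    (h : ∃ c ∈ u, p c = false) : (u ++ v).takeWhile p = u.takeWhile p := by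
  induction u with
  | nil => obtain ⟨c, hc, _⟩ := h; exact absurd hc (by simp)
  | cons a us ih =>
      by_cases ha : p a = true
      · obtain ⟨c, hc, hpc⟩ := h
        have hcus : c ∈ us := by
          cases List.mem_cons.mp hc with
          | inl he => rw [he] at hpc; rw [ha] at hpc; exact absurd hpc (by simp)
          | inr hm => exact hm
        simp [ha, ih ⟨c, hcus, hpc⟩]
      · simp [ha]

-- and when it finds a tail, that tail is exactly what A's endswith scan matches against
theorem rpartTail_some (l : List Char) (h : '.' ∈ l) :
    pvRPartTail l = some (pvLastSeg l) := by
  induction l with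
  | nil => exact absurd h (by simp)
  | cons c rest ih =>
      rw [pvRPartTail]
      by_cases hr : '.' ∈ rest
      · rw [ih hr]
        simp only [Option.some.injEq]
        rw [pvLastSeg, pvLastSeg, List.reverse_cons,
            takeWhile_append_of_stop _ rest.reverse [c] ⟨'.', by simpa using hr, by simp⟩]
      · have hnone : pvRPartTail rest = none := (rpartTail_none_iff rest).mpr hr
        have hc : c = '.' := by
          cases List.mem_cons.mp h with
          | inl he => exact he.symm
          | inr hm => exact absurd hm hr
        rw [hnone]
        simp only [hc, beq_self_eq_true, if_true, Option.some.injEq]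
        rw [pvLastSeg, List.reverse_cons,
            List.takeWhile_append_of_pos (by
              intro x hx
              have : x ≠ '.' := fun he => hr (by simpa [he] using (List.mem_reverse.mp hx))
              simpa using this)]
        simp

-- the bridge: B's branch on the segment = A's dict lookup of '.' + segment
theorem countryOf_eq_lookup (l : List Char) :
    pvCountryOf (String.ofList l) =
      (PySem.Dict.get? (PySem.Dict.mk pvSuffixMap) (String.ofList ('.' :: l))).getD "Unknown" := by
  unfold pvCountryOf
  split
  case h_38 =>
    rename_i h1 h2 h3 h4 h5 h6 h7 h8 h9 h10 h11 h12 h13 h14 h15 h16 h17 h18 h19 h20 h21 h22 h23 h24 h25 h26 h27 h28 h29 h30 h31 h32 h33 h34 h35 h36 h37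
    have k : ∀ (u : List Char), (String.ofList l = String.ofList u → False) →
        (("." ++ String.ofList u : String) == String.ofList ('.' :: l)) = false := by
      intro u hu
      simp only [beq_eq_false_iff_ne, ne_eq, String.ext_iff]
      intro h
      apply hu
      have hc : '.' :: l = '.' :: u := by
        have h2 := h.symm
        simpa [String.ext_iff] using h2
      simp only [String.ext_iff, String.toList_ofList]
      exact List.cons_injective hc
    simp [PySem.Dict.get?, pvSuffixMap,
      show ((".NS" : String) == String.ofList ('.' :: l)) = false from k ['N','S'] h1,
      show ((".BO" : String) == String.ofList ('.' :: l)) = false from k ['B','O'] h2,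
      show ((".DE" : String) == String.ofList ('.' :: l)) = false from k ['D','E'] h3,
      show ((".L" : String) == String.ofList ('.' :: l)) = false from k ['L'] h4,
      show ((".PA" : String) == String.ofList ('.' :: l)) = false from k ['P','A'] h5,
      show ((".AS" : String) == String.ofList ('.' :: l)) = false from k ['A','S'] h6,
      show ((".MI" : String) == String.ofList ('.' :: l)) = false from k ['M','I'] h7,
      show ((".MC" : String) == String.ofList ('.' :: l)) = false from k ['M','C'] h8,
      show ((".SW" : String) == String.ofList ('.' :: l)) = false from k ['S','W'] h9,
      show ((".ST" : String) == String.ofList ('.' :: l)) = false from k ['S','T'] h10,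
      show ((".CO" : String) == String.ofList ('.' :: l)) = false from k ['C','O'] h11,
      show ((".OL" : String) == String.ofList ('.' :: l)) = false from k ['O','L'] h12,
      show ((".HE" : String) == String.ofList ('.' :: l)) = false from k ['H','E'] h13,
      show ((".VI" : String) == String.ofList ('.' :: l)) = false from k ['V','I'] h14,
      show ((".T" : String) == String.ofList ('.' :: l)) = false from k ['T'] h15,
      show ((".HK" : String) == String.ofList ('.' :: l)) = false from k ['H','K'] h16,
      show ((".SS" : String) == String.ofList ('.' :: l)) = false from k ['S','S'] h17,
      show ((".SZ" : String) == String.ofList ('.' :: l)) = false from k ['S','Z'] h18,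
      show ((".KS" : String) == String.ofList ('.' :: l)) = false from k ['K','S'] h19,
      show ((".KQ" : String) == String.ofList ('.' :: l)) = false from k ['K','Q'] h20,
      show ((".TW" : String) == String.ofList ('.' :: l)) = false from k ['T','W'] h21,
      show ((".TWO" : String) == String.ofList ('.' :: l)) = false from k ['T','W','O'] h22,
      show ((".SI" : String) == String.ofList ('.' :: l)) = false from k ['S','I'] h23,
      show ((".AX" : String) == String.ofList ('.' :: l)) = false from k ['A','X'] h24,
      show ((".NZ" : String) == String.ofList ('.' :: l)) = false from k ['N','Z'] h25,
      show ((".JK" : String) == String.ofList ('.' :: l)) = false from k ['J','K'] h26,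
      show ((".BK" : String) == String.ofList ('.' :: l)) = false from k ['B','K'] h27,
      show ((".KL" : String) == String.ofList ('.' :: l)) = false from k ['K','L'] h28,
      show ((".TO" : String) == String.ofList ('.' :: l)) = false from k ['T','O'] h29,
      show ((".V" : String) == String.ofList ('.' :: l)) = false from k ['V'] h30,
      show ((".SA" : String) == String.ofList ('.' :: l)) = false from k ['S','A'] h31,
      show ((".MX" : String) == String.ofList ('.' :: l)) = false from k ['M','X'] h32,
      show ((".SN" : String) == String.ofList ('.' :: l)) = false from k ['S','N'] h33,
      show ((".BA" : String) == String.ofList ('.' :: l)) = false from k ['B','A'] h34,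
      show ((".JO" : String) == String.ofList ('.' :: l)) = false from k ['J','O'] h35,
      show ((".TA" : String) == String.ofList ('.' :: l)) = false from k ['T','A'] h36,
      show ((".IS" : String) == String.ofList ('.' :: l)) = false from k ['I','S'] h37]
  all_goals
    (rename_i h
     have hl := congrArg String.toList h
     simp only [String.toList_ofList] at hl
     subst hl
     decide)

-- ===== VERDICT (by name: the statement is the Claim_ definition above) =====
theorem get_country_from_symbol_spec : Claim_equal_get_country_from_symbol := by
  intro symbol _
  unfold Spec_get_country_from_symbol get_country_from_symbol get_country_from_symbol_alt
  by_cases hd : PySem.Str.isIn "." symbol = true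
  · have hmem : '.' ∈ symbol.toList := (isIn_dot_iff symbol).mp hd
    have hup : '.' ∈ (PySem.Str.upper symbol).toList := (dot_mem_upper_iff symbol).mpr hmem
    simp only []
    rw [loop_eq_lookup (PySem.Str.upper symbol) hup pvSuffixMap pvSuffixMap_good,
        rpartTail_some _ hup]
    simp only [countryOf_eq_lookup]
    cases hv : PySem.Dict.get? (PySem.Dict.mk pvSuffixMap)
        (String.ofList ('.' :: pvLastSeg (PySem.Str.upper symbol).toList)) with
    | none => simp; exact hd
    | some c => simp
  · have hmem : '.' ∉ symbol.toList := fun hm => hd ((isIn_dot_iff symbol).mpr hm)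
    have hup : '.' ∉ (PySem.Str.upper symbol).toList :=
      fun hm => hmem ((dot_mem_upper_iff symbol).mp hm)
    simp only []
    rw [loop_none (PySem.Str.upper symbol) hup pvSuffixMap pvSuffixMap_good,
        (rpartTail_none_iff _).mpr hup]
    simp
    exact Bool.eq_false_iff.mpr hd
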